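-- pv_equiv track=rewrite | github.com/songc/LeetCode-Pyhton | leetcode1224.py | maxEqualFreq
-- ===== SOURCE A (Python) =====
-- import collections
-- from typing import List
--
-- def maxEqualFreq(nums: List[int]) -> int:
--     if len(nums)==1:
--         return 1
--     ans = 1
--     vdict = collections.defaultdict(int)
--     vdict2 = collections.defaultdict(set)
--     for i,num in enumerate(nums):
--         if vdict[num]>0:
--             vdict2[vdict[num]].remove(num)
--             if len(vdict2[vdict[num]])==0:
--                 del vdict2[vdict[num]]
--         vdict[num]+=1
--         vdict2[vdict[num]].add(num)
--         if len(vdict2)==1: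
--             if len(vdict)==1 or 1 in vdict2 :
--                 ans = i
--         elif len(vdict2)==2:
--           for v in vdict2:
--             if len(vdict2[v])==1:
--                 if v==1:
--                     ans = i
--                 elif vdict[list(vdict2[v])[0]]-1 in vdict2:
--                     ans = i
--     return ans+1
-- ===== SOURCE B (Python) =====
-- def canDropOne(freqCount):
--     # The prefix of length L (with frequency multiset described by freqCount)
--     # stays all-equal after removing exactly one element iff one of:
--     fs = sorted(freqCount)
--     if len(fs) == 1:
--         f = fs[0]
--         return f == 1 or freqCount[f] == 1
--     if len(fs) == 2:
--         a, b = fs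
--         return (a == 1 and freqCount[a] == 1) or (b == a + 1 and freqCount[b] == 1)
--     return False
--
--
-- def maxEqualFreq(nums):
--     # Two counting passes, then a BACKWARD scan over prefix lengths with early
--     # exit: the first valid length from the top is the answer.
--     cnt = {}
--     for x in nums:
--         cnt[x] = cnt.get(x, 0) + 1
--     freqCount = {}
--     for f in cnt.values():
--         freqCount[f] = freqCount.get(f, 0) + 1
--     L = len(nums)
--     while L > 0:
--         if canDropOne(freqCount):
--             return L
--         x = nums[L - 1]
--         f = cnt[x]
--         freqCount[f] -= 1
--         if freqCount[f] == 0: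
--             del freqCount[f]
--         if f > 1:
--             cnt[x] = f - 1
--             freqCount[f - 1] = freqCount.get(f - 1, 0) + 1
--         else:
--             del cnt[x]
--         L -= 1
--     return 0
-- ===== Notes on version B (the rewrite author's own statement) =====
-- stated objective: alternative
-- what changed: Replaces A's single forward pass with a dict-of-sets by two counting passes (value counts, then frequency counts) followed by a BACKWARD scan over prefix lengths that undoes one element at a time and returns at the first (i.e. largest) valid length, validity being decided from the sorted list of distinct frequencies.
-- intended difference: On the empty list A returns 2 (its ans=1 floor plus one, although no prefix exists) while B returns 0, the length of the longest valid (empty) prefix, which is the intended answer. — e.g. on maxEqualFreq([]): A returns 2, B returns 0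
import Mathlib
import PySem

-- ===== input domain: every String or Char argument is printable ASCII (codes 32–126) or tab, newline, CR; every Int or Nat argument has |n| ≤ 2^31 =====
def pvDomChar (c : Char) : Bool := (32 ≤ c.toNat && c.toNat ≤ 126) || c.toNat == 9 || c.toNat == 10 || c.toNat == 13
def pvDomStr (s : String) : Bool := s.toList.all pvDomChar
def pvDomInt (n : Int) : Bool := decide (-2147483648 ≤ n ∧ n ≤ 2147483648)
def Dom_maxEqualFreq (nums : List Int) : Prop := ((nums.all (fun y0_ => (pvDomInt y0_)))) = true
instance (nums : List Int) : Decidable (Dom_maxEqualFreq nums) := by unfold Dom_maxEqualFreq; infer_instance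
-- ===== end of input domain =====

-- B replaces A's forward pass with a dict-of-sets by two counting passes followed by a BACKWARD scan over
-- prefix lengths that undoes one element at a time and returns the first (largest) valid length;
-- on [] A returns 2 while B returns 0 (stated as the intended difference D_ below).

-- ===== PORT A =====
-- One step of A's 'for i,num in enumerate(nums)' loop; state = (ans, vdict, vdict2).
-- 'vdict2[vdict[num]].remove(num)' / 'freq dict [] reads' are ported with getD (the key is present whenever
-- Python reaches that read); 'list(vdict2[v])[0]' is read under 'len(vdict2[v])==1', so the head of the
-- one-element set is exact (no dependence on CPython set iteration order).
def stepA (st : Int × PySem.Dict Int Int × PySem.Dict Int (PySem.Set Int)) (pr : Int × Int) :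
    Int × PySem.Dict Int Int × PySem.Dict Int (PySem.Set Int) :=
  let ans := st.1
  let vdict0 := st.2.1
  let vdict2a := st.2.2
  let i := pr.1
  let num := pr.2
  let f := vdict0.getD num 0
  let vdict2b :=
    if f > 0 then
      let s := PySem.Set.discard (vdict2a.getD f PySem.Set.empty) num
      if s.length == 0 then vdict2a.erase f else vdict2a.insert f s
    else vdict2a
  let vdict := vdict0.insert num (f + 1)
  let vdict2 := vdict2b.insert (f + 1) (PySem.Set.add (vdict2b.getD (f + 1) PySem.Set.empty) num)
  let ans :=
    if vdict2.size == 1 then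
      if vdict.size == 1 || vdict2.contains 1 then i else ans
    else if vdict2.size == 2 then
      vdict2.keys.foldl (fun ans v =>
        if (vdict2.getD v PySem.Set.empty).length == 1 then
          if v == 1 then i
          else if vdict2.contains (vdict.getD ((vdict2.getD v PySem.Set.empty).headD 0) 0 - 1) then i
          else ans
        else ans) ans
    else ans
  (ans, vdict, vdict2)

def maxEqualFreq (nums : List Int) : Int :=
  if PySem.List.len nums == 1 then 1
  else ((PySem.List.enumerate nums).foldl stepA (1, PySem.Dict.empty, PySem.Dict.empty)).1 + 1

-- ===== PORT B =====
-- Source B's canDropOne: the validity test on the sorted distinct frequencies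
-- ('freqCount[f]' reads are ported with getD: the key was just taken from freqCount's own key list).
def canDropOne (fc : PySem.Dict Int Int) : Bool :=
  match PySem.List.sorted fc.keys (fun x => x) false with
  | [f] => f == 1 || fc.getD f 0 == 1
  | [a, b] => (a == 1 && fc.getD a 0 == 1) || (b == a + 1 && fc.getD b 0 == 1)
  | _ => false

-- Source B's 'while L > 0' loop: fuel = L; 'nums[L-1]' and 'cnt[x]' are in range/present whenever Python
-- reaches them (L ≤ len(nums) and x occurs in the length-L prefix), so pyGet?/getD are exact there.
def loopB (nums : List Int) (cnt fc : PySem.Dict Int Int) : Nat → Int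
  | 0 => 0
  | L + 1 =>
    if canDropOne fc then ((L : Int) + 1)
    else
      let x := (PySem.List.pyGet? nums (L : Int)).getD 0
      let f := cnt.getD x 0
      let fc1 := fc.insert f (fc.getD f 0 - 1)
      let fc2 := if fc1.getD f 0 == 0 then fc1.erase f else fc1
      let cnt' := if f > 1 then cnt.insert x (f - 1) else cnt.erase x
      let fc3 := if f > 1 then fc2.insert (f - 1) (fc2.getD (f - 1) 0 + 1) else fc2
      loopB nums cnt' fc3 L

def maxEqualFreq_alt (nums : List Int) : Int :=
  let cnt := nums.foldl (fun d x => d.insert x (d.getD x 0 + 1)) PySem.Dict.empty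
  let fc := cnt.values.foldl (fun d f => d.insert f (d.getD f 0 + 1)) PySem.Dict.empty
  loopB nums cnt fc nums.length

-- ===== PRECONDITION & SPEC =====
-- On the empty list A returns 2 (its ans=1 floor plus one, although no prefix exists) while B returns 0,
-- the length of the longest valid (empty) prefix, which is the intended answer.
def D_maxEqualFreq (nums : List Int) : Prop := nums = []
instance (nums : List Int) : Decidable (D_maxEqualFreq nums) := by unfold D_maxEqualFreq; infer_instance

def Spec_maxEqualFreq (nums : List Int) (out : Int) : Prop := ¬ D_maxEqualFreq nums → out = maxEqualFreq_alt nums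
instance (nums : List Int) (out : Int) : Decidable (Spec_maxEqualFreq nums out) := by unfold Spec_maxEqualFreq; infer_instance

def pvDiffWitness_maxEqualFreq : List Int := ([])
def pvDiffWitnessOut_maxEqualFreq : Int × Int := (2, 0)

-- ===== CLAIM (what is proved, stated in full; the proofs are below) =====
def Claim_unchanged_maxEqualFreq : Prop := ∀ (nums : List Int), Dom_maxEqualFreq nums → Spec_maxEqualFreq nums (maxEqualFreq nums)
def Claim_changed_maxEqualFreq : Prop := Dom_maxEqualFreq (pvDiffWitness_maxEqualFreq) ∧ D_maxEqualFreq (pvDiffWitness_maxEqualFreq) ∧ maxEqualFreq (pvDiffWitness_maxEqualFreq) = pvDiffWitnessOut_maxEqualFreq.1 ∧ maxEqualFreq_alt (pvDiffWitness_maxEqualFreq) = pvDiffWitnessOut_maxEqualFreq.2 ∧ pvDiffWitnessOut_maxEqualFreq.1 ≠ pvDiffWitnessOut_maxEqualFreq.2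
def Claim_exact_maxEqualFreq : Prop := ∀ (nums : List Int), Dom_maxEqualFreq nums → D_maxEqualFreq nums → maxEqualFreq nums ≠ maxEqualFreq_alt nums

-- ===== LEMMAS AND PROOFS =====

-- count of y in the processed prefix, as an Int
def cI (p : List Int) (y : Int) : Int := (p.count y : Int)
-- the distinct elements of the prefix
def Dst (p : List Int) : List Int := PySem.Set.ofList p
-- number of distinct values whose frequency in p is f
def Fc (p : List Int) (f : Int) : Int := ((Dst p).countP (fun y => cI p y == f) : Int)
-- the distinct frequencies occurring in p
def Ks (p : List Int) : List Int := PySem.Set.ofList ((Dst p).map (cI p))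

-- the abstract per-prefix validity condition (both ports' tests reduce to it)
def condAbs (p : List Int) : Bool :=
  ((Ks p).length == 1 && (((Dst p).length : Int) == 1 || (Ks p).contains 1)) ||
  ((Ks p).length == 2 && (Ks p).any (fun v => Fc p v == 1 && (v == 1 || (Ks p).contains (v - 1))))

-- the largest valid prefix length ≤ L (the specification both ports compute)
def bestPref (nums : List Int) : Nat → Int
  | 0 => 0
  | L + 1 => if condAbs (nums.take (L + 1)) then ((L : Int) + 1) else bestPref nums L

-- A's value dict is the counter of p, its keys the distinct elements of p
def GoodV (p : List Int) (V : PySem.Dict Int Int) : Prop :=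
  V.keys.Nodup ∧ (∀ x, x ∈ V.keys ↔ x ∈ p) ∧ (∀ x, V.getD x 0 = cI p x)
-- A's bucket dict maps each occurring frequency to the set of values having it
def GoodW (p : List Int) (W : PySem.Dict Int (PySem.Set Int)) : Prop :=
  W.keys.Nodup ∧ (∀ f, f ∈ W.keys ↔ ∃ y ∈ p, cI p y = f) ∧
  (∀ f s, W.get? f = some s → s.Nodup ∧ ∀ y, (y ∈ s ↔ y ∈ p ∧ cI p y = f))
-- the bucket dict midway through A's step: x has been removed from its old bucket
def MidW (q : List Int) (x : Int) (W : PySem.Dict Int (PySem.Set Int)) : Prop :=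
  W.keys.Nodup ∧ (∀ f, f ∈ W.keys ↔ ∃ y ∈ q, y ≠ x ∧ cI q y = f) ∧
  (∀ f s, W.get? f = some s → s.Nodup ∧ ∀ y, (y ∈ s ↔ y ∈ q ∧ y ≠ x ∧ cI q y = f))

-- invariant of A's loop state after processing prefix p
def InvA (p : List Int) (st : Int × PySem.Dict Int Int × PySem.Dict Int (PySem.Set Int)) : Prop :=
  GoodV p st.2.1 ∧ GoodW p st.2.2

-- invariant of B's frequency-count dict for the current prefix p
def InvFC (p : List Int) (fc : PySem.Dict Int Int) : Prop :=
  fc.keys.Nodup ∧ (∀ f, f ∈ fc.keys ↔ 0 < Fc p f) ∧ (∀ f, fc.getD f 0 = Fc p f)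

-- ---- generic dict lemmas (PySem has none for erase) ----
theorem pv_find?_filter_ne {ν : Type} (l : List (Int × ν)) (k k' : Int) (h : k' ≠ k) :
    (l.filter (fun p => !(p.1 == k))).find? (fun p => p.1 == k') = l.find? (fun p => p.1 == k') := by
  induction l with
  | nil => rfl
  | cons hd t ih =>
    rw [List.filter_cons]
    by_cases h1 : hd.1 = k
    · rw [if_neg (by simp [h1]), List.find?_cons_of_neg (by simp [h1]; omega)]
      exact ih
    · rw [if_pos (by simp [h1])]
      by_cases h3 : hd.1 = k'
      · rw [List.find?_cons_of_pos (by simp [h3]), List.find?_cons_of_pos (by simp [h3])]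
      · rw [List.find?_cons_of_neg (by simp [h3]), List.find?_cons_of_neg (by simp [h3])]
        exact ih

theorem pv_get?_erase {ν : Type} (d : PySem.Dict Int ν) (k k' : Int) :
    (d.erase k).get? k' = if k' = k then none else d.get? k' := by
  obtain ⟨l⟩ := d
  show ((l.filter (fun p => !(p.1 == k))).find? (fun p => p.1 == k')).map (·.2)
      = if k' = k then none else (l.find? (fun p => p.1 == k')).map (·.2)
  by_cases hkk : k' = k
  · rw [if_pos hkk, List.find?_eq_none.mpr, Option.map_none]
    intro x hx
    have := List.of_mem_filter hx
    simp at this ⊢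
    omega
  · rw [if_neg hkk, pv_find?_filter_ne l k k' hkk]

theorem pv_getD_erase (d : PySem.Dict Int Int) (k k' : Int) (dflt : Int) :
    (d.erase k).getD k' dflt = if k' = k then dflt else d.getD k' dflt := by
  unfold PySem.Dict.getD
  rw [pv_get?_erase]
  by_cases h : k' = k <;> simp [h]

theorem pv_keys_erase {ν : Type} (d : PySem.Dict Int ν) (k : Int) :
    (d.erase k).keys = d.keys.filter (fun k'' => !(k'' == k)) := by
  obtain ⟨l⟩ := d
  show (l.filter (fun p => !(p.1 == k))).map (·.1) = (l.map (·.1)).filter (fun k'' => !(k'' == k))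
  induction l with
  | nil => rfl
  | cons hd t ih =>
    rw [List.filter_cons, List.map_cons, List.filter_cons]
    by_cases h1 : hd.1 = k
    · rw [if_neg (by simp [h1]), if_neg (by simp [h1]), ih]
    · rw [if_pos (by simp [h1]), if_pos (by simp [h1]), List.map_cons, ih]

theorem pv_length_eq_of_mem_iff {l1 l2 : List Int} (h1 : l1.Nodup) (h2 : l2.Nodup)
    (h : ∀ y, y ∈ l1 ↔ y ∈ l2) : l1.length = l2.length :=
  ((List.perm_ext_iff_of_nodup h1 h2).mpr h).length_eq

-- ---- counting lemmas ----
theorem pv_cI_append (q : List Int) (x y : Int) :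
    cI (q ++ [x]) y = cI q y + (if y = x then 1 else 0) := by
  unfold cI
  rw [List.count_append]
  by_cases h : y = x
  · simp [h, List.count_cons]
  · have hxy : ¬ x = y := fun hh => h hh.symm
    simp [List.count_cons, h, hxy]

theorem pv_mem_Dst (p : List Int) (y : Int) : y ∈ Dst p ↔ y ∈ p := by
  unfold Dst; exact PySem.Set.mem_ofList p y

theorem pv_nodup_Dst (p : List Int) : (Dst p).Nodup := by
  unfold Dst; exact PySem.Set.nodup_ofList p

theorem pv_Dst_append_mem (q : List Int) (x : Int) (hx : x ∈ q) : Dst (q ++ [x]) = Dst q := by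
  unfold Dst
  rw [PySem.Set.ofList_append_singleton, PySem.Set.add_of_mem ((PySem.Set.mem_ofList q x).mpr hx)]

theorem pv_Dst_append_not_mem (q : List Int) (x : Int) (hx : x ∉ q) :
    Dst (q ++ [x]) = Dst q ++ [x] := by
  unfold Dst
  rw [PySem.Set.ofList_append_singleton, PySem.Set.add_of_not_mem (fun h => hx ((PySem.Set.mem_ofList q x).mp h))]

theorem pv_countP_update {l : List Int} (hn : l.Nodup) {x : Int} (hx : x ∈ l)
    (g g' : Int → Bool) (hagree : ∀ y ∈ l, y ≠ x → g' y = g y) :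
    (l.countP g' : Int) = (l.countP g : Int) + (if g' x then 1 else 0) - (if g x then 1 else 0) := by
  induction l with
  | nil => simp at hx
  | cons hd t ih =>
    rw [List.countP_cons, List.countP_cons]
    rcases List.mem_cons.mp hx with h | h
    · obtain rfl : hd = x := h.symm
      have hxt : hd ∉ t := (List.nodup_cons.mp hn).1
      have ht : t.countP g' = t.countP g := List.countP_congr (fun y hy => by
        rw [hagree y (List.mem_cons_of_mem _ hy) (fun e => hxt (e ▸ hy))])
      rw [ht]
      by_cases h1 : g' hd <;> by_cases h2 : g hd <;> simp [h1, h2] <;> push_cast <;> ring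
    · have hhd : hd ≠ x := fun e => (List.nodup_cons.mp hn).1 (e ▸ h)
      rw [hagree hd (List.mem_cons_self) hhd]
      have := ih (List.nodup_cons.mp hn).2 h (fun y hy hne => hagree y (List.mem_cons_of_mem _ hy) hne)
      by_cases h2 : g hd <;> simp [h2] <;> push_cast at this ⊢ <;> omega

theorem pv_Fc_append_mem (q : List Int) (x : Int) (hx : x ∈ q) (f : Int) :
    Fc (q ++ [x]) f = Fc q f + (if f = cI q x + 1 then 1 else 0) - (if f = cI q x then 1 else 0) := by
  unfold Fc
  rw [pv_Dst_append_mem q x hx]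
  rw [pv_countP_update (pv_nodup_Dst q) ((pv_mem_Dst q x).mpr hx)
    (g := fun y => cI q y == f) (g' := fun y => cI (q ++ [x]) y == f)
    (fun y _ hne => by
      show (cI (q ++ [x]) y == f) = (cI q y == f)
      rw [pv_cI_append, if_neg hne, add_zero])]
  rw [pv_cI_append, if_pos rfl]
  simp only [beq_iff_eq]
  split_ifs <;> omega

theorem pv_Fc_append_not_mem (q : List Int) (x : Int) (hx : x ∉ q) (f : Int) :
    Fc (q ++ [x]) f = Fc q f + (if f = 1 then 1 else 0) := by
  unfold Fc
  rw [pv_Dst_append_not_mem q x hx, List.countP_append]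
  have h1 : (Dst q).countP (fun y => cI (q ++ [x]) y == f) = (Dst q).countP (fun y => cI q y == f) := by
    refine List.countP_congr (fun y hy => by
      have hne : y ≠ x := fun e => hx (e ▸ (pv_mem_Dst q y).mp hy)
      rw [pv_cI_append, if_neg hne, add_zero])
  have h2 : cI (q ++ [x]) x = 1 := by
    rw [pv_cI_append, if_pos rfl]
    unfold cI
    simp [List.count_eq_zero_of_not_mem hx]
  rw [h1, List.countP_cons, List.countP_nil, h2]
  simp only [beq_iff_eq]
  split_ifs <;> omega

theorem pv_Fc_nonneg (p : List Int) (f : Int) : 0 ≤ Fc p f := by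
  unfold Fc; positivity

theorem pv_Fc_pos_iff (p : List Int) (f : Int) : 0 < Fc p f ↔ ∃ y ∈ p, cI p y = f := by
  unfold Fc
  rw [show ((0:Int) < ((Dst p).countP (fun y => cI p y == f) : Int)) ↔
      0 < (Dst p).countP (fun y => cI p y == f) by exact_mod_cast Iff.rfl]
  rw [List.countP_pos_iff]
  constructor
  · rintro ⟨y, hy, hb⟩
    exact ⟨y, (pv_mem_Dst p y).mp hy, by simpa using hb⟩
  · rintro ⟨y, hy, hb⟩
    exact ⟨y, (pv_mem_Dst p y).mpr hy, by simpa using hb⟩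

theorem pv_nodup_Ks (p : List Int) : (Ks p).Nodup := by
  unfold Ks; exact PySem.Set.nodup_ofList _

theorem pv_mem_Ks (p : List Int) (f : Int) : f ∈ Ks p ↔ ∃ y ∈ p, cI p y = f := by
  unfold Ks
  rw [PySem.Set.mem_ofList, List.mem_map]
  constructor
  · rintro ⟨y, hy, rfl⟩
    exact ⟨y, (pv_mem_Dst p y).mp hy, rfl⟩
  · rintro ⟨y, hy, rfl⟩
    exact ⟨y, (pv_mem_Dst p y).mpr hy, rfl⟩

theorem pv_freq_pos (p : List Int) (f : Int) (h : ∃ y ∈ p, cI p y = f) : 1 ≤ f := by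
  obtain ⟨y, hy, hc⟩ := h
  have : 0 < p.count y := List.count_pos_iff.mpr hy
  unfold cI at hc
  omega

-- ---- the keys-form of the condition transfers to condAbs ----
theorem pv_cond_keys (p : List Int) (ks : List Int) (hnd : ks.Nodup)
    (hmem : ∀ f, f ∈ ks ↔ ∃ y ∈ p, cI p y = f) :
    ((((ks.length : Int) = 1 ∧ (((Dst p).length : Int) = 1 ∨ (1:Int) ∈ ks)) ∨
      ((ks.length : Int) = 2 ∧ ∃ v ∈ ks, Fc p v = 1 ∧ (v = 1 ∨ v - 1 ∈ ks)))
     ↔ condAbs p = true) := by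
  have hmm : ∀ f, f ∈ ks ↔ f ∈ Ks p := fun f => by rw [hmem, pv_mem_Ks]
  have hlen : ks.length = (Ks p).length := pv_length_eq_of_mem_iff hnd (pv_nodup_Ks p) hmm
  unfold condAbs
  simp only [Bool.or_eq_true, Bool.and_eq_true, beq_iff_eq, List.any_eq_true,
    List.contains_iff_mem]
  rw [← hlen]
  constructor
  · rintro (⟨h1, h2⟩ | ⟨h1, v, hv, h2, h3⟩)
    · exact Or.inl ⟨by exact_mod_cast h1, h2.imp id (hmm 1).mp⟩
    · exact Or.inr ⟨by exact_mod_cast h1, v, (hmm v).mp hv, h2, h3.imp id (hmm _).mp⟩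
  · rintro (⟨h1, h2⟩ | ⟨h1, v, hv, h2, h3⟩)
    · exact Or.inl ⟨by exact_mod_cast h1, h2.imp id (hmm 1).mpr⟩
    · exact Or.inr ⟨by exact_mod_cast h1, v, (hmm v).mpr hv, h2, h3.imp id (hmm _).mpr⟩

-- condAbs holds on every one-element prefix
theorem pv_cond_singleton (x : Int) : condAbs [x] = true := by
  have hD : Dst [x] = [x] := by
    unfold Dst
    rw [show ([x] : List Int) = [] ++ [x] from rfl, PySem.Set.ofList_append_singleton]
    simp [PySem.Set.add_of_not_mem]
  have hc : cI [x] x = 1 := by unfold cI; simp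
  have hK : Ks [x] = [1] := by
    unfold Ks
    rw [hD, List.map_cons, List.map_nil, hc,
      show ([(1:Int)] : List Int) = [] ++ [1] from rfl, PySem.Set.ofList_append_singleton]
    simp [PySem.Set.add_of_not_mem]
  unfold condAbs
  rw [hK, hD]
  simp

-- ---- A's dictionary updates ----
theorem pv_mid_of_not_mem (q : List Int) (x : Int) (W : PySem.Dict Int (PySem.Set Int))
    (hx : x ∉ q) (h : GoodW q W) : MidW q x W := by
  obtain ⟨h1, h2, h3⟩ := h
  refine ⟨h1, fun f => ?_, fun f s hs => ?_⟩
  · rw [h2]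
    constructor
    · rintro ⟨y, hy, hc⟩
      exact ⟨y, hy, fun e => hx (e ▸ hy), hc⟩
    · rintro ⟨y, hy, _, hc⟩
      exact ⟨y, hy, hc⟩
  · obtain ⟨hn, hm⟩ := h3 f s hs
    refine ⟨hn, fun y => ?_⟩
    rw [hm]
    constructor
    · rintro ⟨hy, hc⟩
      exact ⟨hy, fun e => hx (e ▸ hy), hc⟩
    · rintro ⟨hy, _, hc⟩
      exact ⟨hy, hc⟩

theorem pv_mid_of_mem (q : List Int) (x : Int) (W : PySem.Dict Int (PySem.Set Int))
    (hx : x ∈ q) (h : GoodW q W) :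
    MidW q x
      (if (PySem.Set.discard (W.getD (cI q x) PySem.Set.empty) x).length == 0 then
        W.erase (cI q x)
      else W.insert (cI q x) (PySem.Set.discard (W.getD (cI q x) PySem.Set.empty) x)) := by
  obtain ⟨h1, h2, h3⟩ := h
  have hFk : cI q x ∈ W.keys := (h2 _).mpr ⟨x, hx, rfl⟩
  obtain ⟨s0, hs0⟩ : ∃ s0, W.get? (cI q x) = some s0 := by
    cases hget : W.get? (cI q x) with
    | none => exact absurd hFk ((PySem.Dict.get?_eq_none_iff_not_mem_keys _ _).mp hget)
    | some s0 => exact ⟨s0, rfl⟩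
  obtain ⟨hs0n, hs0m⟩ := h3 _ s0 hs0
  rw [PySem.Dict.getD_of_get?_eq_some _ _ hs0]
  have hdm : ∀ y, y ∈ PySem.Set.discard s0 x ↔ (y ∈ q ∧ y ≠ x ∧ cI q y = cI q x) := by
    intro y
    rw [PySem.Set.mem_discard, hs0m y]
    tauto
  by_cases hlen : (PySem.Set.discard s0 x).length = 0
  · rw [if_pos (by simpa using hlen)]
    have hempty : ∀ y, ¬ (y ∈ q ∧ y ≠ x ∧ cI q y = cI q x) := by
      intro y hy
      have hmem' : y ∈ PySem.Set.discard s0 x := (hdm y).mpr hy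
      rw [show PySem.Set.discard s0 x = [] from List.length_eq_zero_iff.mp hlen] at hmem'
      exact absurd hmem' (List.not_mem_nil)
    refine ⟨?_, fun f => ?_, fun f s hs => ?_⟩
    · rw [pv_keys_erase]
      exact h1.filter _
    · rw [pv_keys_erase, List.mem_filter]
      constructor
      · rintro ⟨hf, hne⟩
        obtain ⟨y, hy, hc⟩ := (h2 f).mp hf
        refine ⟨y, hy, fun e => ?_, hc⟩
        subst e
        simp at hne
        exact hne (by rw [← hc])
      · rintro ⟨y, hy, hyx, hc⟩
        refine ⟨(h2 f).mpr ⟨y, hy, hc⟩, ?_⟩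
        simp only [Bool.not_eq_eq_eq_not, Bool.not_true, beq_eq_false_iff_ne, ne_eq]
        intro e
        exact hempty y ⟨hy, hyx, by rw [hc, e]⟩
    · rw [pv_get?_erase] at hs
      by_cases hf : f = cI q x
      · rw [if_pos hf] at hs
        exact absurd hs (by simp)
      · rw [if_neg hf] at hs
        obtain ⟨hn, hm⟩ := h3 f s hs
        refine ⟨hn, fun y => ?_⟩
        rw [hm]
        constructor
        · rintro ⟨hy, hc⟩
          exact ⟨hy, fun e => hf (by rw [← hc, e]), hc⟩
        · rintro ⟨hy, _, hc⟩
          exact ⟨hy, hc⟩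
  · rw [if_neg (by simpa using hlen)]
    obtain ⟨w, hw⟩ := List.exists_mem_of_ne_nil (PySem.Set.discard s0 x) (fun e => hlen (by rw [e]; rfl))
    have hwp := (hdm w).mp hw
    refine ⟨PySem.Dict.nodup_keys_insert _ _ _ h1, fun f => ?_, fun f s hs => ?_⟩
    · rw [PySem.Dict.mem_keys_insert]
      constructor
      · rintro (rfl | hf)
        · exact ⟨w, hwp.1, hwp.2.1, hwp.2.2⟩
        · obtain ⟨y, hy, hc⟩ := (h2 f).mp hf
          by_cases hyx : y = x
          · subst hyx
            exact ⟨w, hwp.1, hwp.2.1, by rw [hwp.2.2, hc]⟩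
          · exact ⟨y, hy, hyx, hc⟩
      · rintro ⟨y, hy, hyx, hc⟩
        exact Or.inr ((h2 f).mpr ⟨y, hy, hc⟩)
    · rw [PySem.Dict.get?_insert] at hs
      by_cases hf : f = cI q x
      · rw [if_pos hf] at hs
        obtain rfl : PySem.Set.discard s0 x = s := by injection hs
        refine ⟨PySem.Set.nodup_discard _ _ hs0n, fun y => ?_⟩
        rw [hdm y, hf]
      · rw [if_neg hf] at hs
        obtain ⟨hn, hm⟩ := h3 f s hs
        refine ⟨hn, fun y => ?_⟩
        rw [hm]
        constructor
        · rintro ⟨hy, hc⟩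
          exact ⟨hy, fun e => hf (by rw [← hc, e]), hc⟩
        · rintro ⟨hy, _, hc⟩
          exact ⟨hy, hc⟩

theorem pv_stage2 (q : List Int) (x : Int) (W : PySem.Dict Int (PySem.Set Int))
    (h : MidW q x W) :
    GoodW (q ++ [x])
      (W.insert (cI q x + 1) (PySem.Set.add (W.getD (cI q x + 1) PySem.Set.empty) x)) := by
  obtain ⟨h1, h2, h3⟩ := h
  have hcx : cI (q ++ [x]) x = cI q x + 1 := by rw [pv_cI_append, if_pos rfl]
  have hcne : ∀ y, y ≠ x → cI (q ++ [x]) y = cI q y := fun y hy => by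
    rw [pv_cI_append, if_neg hy, add_zero]
  have hs1 : ((W.getD (cI q x + 1) PySem.Set.empty).Nodup) ∧
      (∀ y, y ∈ W.getD (cI q x + 1) PySem.Set.empty ↔ (y ∈ q ∧ y ≠ x ∧ cI q y = cI q x + 1)) := by
    cases hget : W.get? (cI q x + 1) with
    | none =>
      rw [PySem.Dict.getD_of_get?_eq_none _ _ hget]
      refine ⟨List.nodup_nil, fun y => ?_⟩
      simp only [PySem.Set.empty, List.not_mem_nil, false_iff]
      rintro ⟨hy, hyx, hc⟩
      exact ((PySem.Dict.get?_eq_none_iff_not_mem_keys _ _).mp hget) ((h2 _).mpr ⟨y, hy, hyx, hc⟩)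
    | some s =>
      rw [PySem.Dict.getD_of_get?_eq_some _ _ hget]
      exact (h3 _ s hget)
  refine ⟨PySem.Dict.nodup_keys_insert _ _ _ h1, fun f => ?_, fun f s hs => ?_⟩
  · rw [PySem.Dict.mem_keys_insert, h2]
    constructor
    · rintro (rfl | ⟨y, hy, hyx, hc⟩)
      · exact ⟨x, by simp, hcx⟩
      · exact ⟨y, List.mem_append_left _ hy, by rw [hcne y hyx]; exact hc⟩
    · rintro ⟨y, hy, hc⟩
      rcases List.mem_append.mp hy with hy | hy
      · by_cases hyx : y = x
        · subst hyx
          left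
          rw [← hc, hcx]
        · right
          exact ⟨y, hy, hyx, by rw [← hc, hcne y hyx]⟩
      · left
        rw [List.mem_singleton] at hy
        subst hy
        rw [← hc, hcx]
  · rw [PySem.Dict.get?_insert] at hs
    by_cases hf : f = cI q x + 1
    · rw [if_pos hf] at hs
      obtain rfl : PySem.Set.add (W.getD (cI q x + 1) PySem.Set.empty) x = s := by
        injection hs
      refine ⟨PySem.Set.nodup_add _ _ hs1.1, fun y => ?_⟩
      rw [PySem.Set.mem_add, hs1.2 y]
      constructor
      · rintro (⟨hy, hyx, hc⟩ | rfl)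
        · exact ⟨List.mem_append_left _ hy, hf ▸ (by rw [hcne y hyx, hc])⟩
        · exact ⟨by simp, hf ▸ hcx⟩
      · rintro ⟨hy, hc⟩
        by_cases hyx : y = x
        · exact Or.inr hyx
        · rcases List.mem_append.mp hy with hy | hy
          · exact Or.inl ⟨hy, hyx, by rw [← hcne y hyx, hc, hf]⟩
          · exact absurd (List.mem_singleton.mp hy) hyx
    · rw [if_neg hf] at hs
      obtain ⟨hn, hm⟩ := h3 f s hs
      refine ⟨hn, fun y => ?_⟩
      rw [hm]
      constructor
      · rintro ⟨hy, hyx, hc⟩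
        exact ⟨List.mem_append_left _ hy, by rw [hcne y hyx, hc]⟩
      · rintro ⟨hy, hc⟩
        by_cases hyx : y = x
        · subst hyx
          rw [hcx] at hc
          exact absurd hc.symm hf
        · rcases List.mem_append.mp hy with hy | hy
          · exact ⟨hy, hyx, by rw [← hcne y hyx, hc]⟩
          · exact absurd (List.mem_singleton.mp hy) hyx

theorem pv_goodV_step (q : List Int) (x : Int) (V : PySem.Dict Int Int) (h : GoodV q V) :
    GoodV (q ++ [x]) (V.insert x (cI q x + 1)) := by
  obtain ⟨h1, h2, h3⟩ := h
  refine ⟨PySem.Dict.nodup_keys_insert _ _ _ h1, fun y => ?_, fun y => ?_⟩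
  · rw [PySem.Dict.mem_keys_insert, h2, List.mem_append, List.mem_singleton, or_comm]
  · rw [PySem.Dict.getD_insert, pv_cI_append]
    by_cases hyx : y = x <;> simp [hyx, h3 y]

-- A's inner 'for v in vdict2' loop, collapsed to an any-test
theorem pv_foldl_body (l : List Int) (W : PySem.Dict Int (PySem.Set Int))
    (V : PySem.Dict Int Int) (i a0 : Int) :
    l.foldl (fun ans v =>
        if (W.getD v PySem.Set.empty).length == 1 then
          if v == 1 then i
          else if W.contains (V.getD ((W.getD v PySem.Set.empty).headD 0) 0 - 1) then i
          else ans
        else ans) a0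
    = if l.any (fun v => (W.getD v PySem.Set.empty).length == 1 &&
        (v == 1 || W.contains (V.getD ((W.getD v PySem.Set.empty).headD 0) 0 - 1))) then i else a0 := by
  induction l generalizing a0 with
  | nil => rfl
  | cons hd t ih =>
    rw [List.foldl_cons, List.any_cons]
    by_cases e1 : ((W.getD hd PySem.Set.empty).length == 1) = true
    · by_cases e2 : (hd == 1) = true
      · simp only [e1, e2, if_true, Bool.true_and, Bool.true_or, ih]
        simp
      · by_cases e3 : (W.contains (V.getD ((W.getD hd PySem.Set.empty).headD 0) 0 - 1)) = true <;>
          simp only [e1, e2, e3, if_true, if_false, Bool.true_and, Bool.false_or, ih] <;> simp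
    · simp only [e1, if_false, Bool.false_and, Bool.false_or, ih]
      simp [e1]

-- ---- A's validity test, reduced to the keys-form condition ----
theorem pv_condA (p : List Int) (V : PySem.Dict Int Int) (W : PySem.Dict Int (PySem.Set Int))
    (hV : GoodV p V) (hW : GoodW p W) (i ans : Int) :
    (if W.size == 1 then
      if V.size == 1 || W.contains 1 then i else ans
    else if W.size == 2 then
      W.keys.foldl (fun ans v =>
        if (W.getD v PySem.Set.empty).length == 1 then
          if v == 1 then i
          else if W.contains (V.getD ((W.getD v PySem.Set.empty).headD 0) 0 - 1) then i
          else ans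
        else ans) ans
    else ans)
    = if (((W.keys.length : Int) = 1 ∧ (((Dst p).length : Int) = 1 ∨ (1:Int) ∈ W.keys)) ∨
        ((W.keys.length : Int) = 2 ∧ ∃ v ∈ W.keys, Fc p v = 1 ∧ (v = 1 ∨ v - 1 ∈ W.keys)))
      then i else ans := by
  obtain ⟨hV1, hV2, hV3⟩ := hV
  obtain ⟨hW1, hW2, hW3⟩ := hW
  have hsz : W.size = W.keys.length := by
    simp [PySem.Dict.keys, PySem.Dict.size]
  have hVsz : V.size = V.keys.length := by
    simp [PySem.Dict.keys, PySem.Dict.size]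
  have hDlen : V.keys.length = (Dst p).length :=
    pv_length_eq_of_mem_iff hV1 (pv_nodup_Dst p) (fun y => by rw [hV2, pv_mem_Dst])
  have hbucket : ∀ v ∈ W.keys, ∃ s, W.getD v PySem.Set.empty = s ∧ (s.length : Int) = Fc p v ∧
      (∀ y, y ∈ s ↔ y ∈ p ∧ cI p y = v) := by
    intro v hv
    obtain ⟨s, hget⟩ : ∃ s, W.get? v = some s := by
      cases hget : W.get? v with
      | none => exact absurd hv (fun hh => ((PySem.Dict.get?_eq_none_iff_not_mem_keys _ _).mp hget) hh)
      | some s => exact ⟨s, rfl⟩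
    obtain ⟨hn, hm⟩ := hW3 v s hget
    refine ⟨s, PySem.Dict.getD_of_get?_eq_some _ _ hget, ?_, hm⟩
    unfold Fc
    rw [List.countP_eq_length_filter]
    congr 1
    exact pv_length_eq_of_mem_iff hn ((pv_nodup_Dst p).filter _) (fun y => by
      rw [hm y, List.mem_filter, pv_mem_Dst]
      simp)
  have hPiff : ∀ v ∈ W.keys,
      (((W.getD v PySem.Set.empty).length == 1 &&
        (v == 1 || W.contains (V.getD ((W.getD v PySem.Set.empty).headD 0) 0 - 1))) = true)
      ↔ (Fc p v = 1 ∧ (v = 1 ∨ v - 1 ∈ W.keys)) := by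
    intro v hv
    obtain ⟨s, hgetD, hlenF, hmemS⟩ := hbucket v hv
    rw [hgetD]
    by_cases hsl : s.length = 1
    · obtain ⟨y, rfl⟩ := List.length_eq_one_iff.mp hsl
      have hy := (hmemS y).mp (List.mem_singleton_self y)
      have hVy : V.getD y 0 = v := by rw [hV3 y, hy.2]
      simp only [List.headD_cons, hVy, Bool.and_eq_true, Bool.or_eq_true, beq_iff_eq,
        PySem.Dict.contains_iff_mem_keys, List.length_cons, List.length_nil]
      constructor
      · rintro ⟨_, hd⟩
        exact ⟨by omega, hd⟩
      · rintro ⟨_, hd⟩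
        exact ⟨by simp, hd⟩
    · have : ¬ (Fc p v = 1) := by omega
      simp only [Bool.and_eq_true, beq_iff_eq]
      constructor
      · rintro ⟨hl, _⟩
        exact absurd hl hsl
      · rintro ⟨hF, _⟩
        exact absurd hF this
  by_cases hc1 : W.keys.length = 1
  · rw [if_pos (show (W.size == 1) = true by simp [hsz, hc1])]
    by_cases hD : ((Dst p).length : Int) = 1 ∨ (1:Int) ∈ W.keys
    · rw [if_pos (show (V.size == 1 || W.contains 1) = true by
        rcases hD with hD | hD
        · simp only [Bool.or_eq_true, beq_iff_eq, hVsz, hDlen]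
          exact Or.inl (by omega)
        · simp only [Bool.or_eq_true, PySem.Dict.contains_iff_mem_keys]
          exact Or.inr hD),
        if_pos (Or.inl ⟨by exact_mod_cast hc1, hD⟩)]
    · rw [if_neg (show ¬ ((V.size == 1 || W.contains 1) = true) by
        simp only [Bool.or_eq_true, beq_iff_eq, hVsz, hDlen, PySem.Dict.contains_iff_mem_keys]
        rintro (h | h)
        · exact hD (Or.inl (by omega))
        · exact hD (Or.inr h)),
        if_neg (by
          rintro (⟨_, hd⟩ | ⟨hl, _⟩)
          · exact hD hd
          · rw [show W.keys.length = 1 from hc1] at hl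
            omega)]
  · rw [if_neg (by simp [hsz, hc1])]
    by_cases hc2 : W.keys.length = 2
    · rw [if_pos (by simp [hsz, hc2])]
      rw [pv_foldl_body]
      by_cases hE : ∃ v ∈ W.keys, Fc p v = 1 ∧ (v = 1 ∨ v - 1 ∈ W.keys)
      · rw [if_pos (by
          rw [List.any_eq_true]
          obtain ⟨v, hv, hvP⟩ := hE
          exact ⟨v, hv, (hPiff v hv).mpr hvP⟩),
          if_pos (Or.inr ⟨by exact_mod_cast hc2, hE⟩)]
      · rw [if_neg (by
          rw [List.any_eq_true]
          rintro ⟨v, hv, hvP⟩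
          exact hE ⟨v, hv, (hPiff v hv).mp hvP⟩),
          if_neg (by
            rintro (⟨hl, _⟩ | ⟨_, hd⟩)
            · rw [show W.keys.length = 2 from hc2] at hl
              omega
            · exact hE hd)]
    · rw [if_neg (by simp [hsz, hc2]),
        if_neg (by
          rintro (⟨hl, _⟩ | ⟨hl, _⟩)
          · exact hc1 (by exact_mod_cast hl)
          · exact hc2 (by exact_mod_cast hl))]

-- ---- A's step: new answer = if condAbs then i else old answer ----
theorem pv_stepA (q : List Int) (x : Int)
    (sA : Int × PySem.Dict Int Int × PySem.Dict Int (PySem.Set Int)) (hA : InvA q sA) :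
    InvA (q ++ [x]) (stepA sA ((q.length : Int), x)) ∧
    (stepA sA ((q.length : Int), x)).1 =
      (if condAbs (q ++ [x]) then (q.length : Int) else sA.1) := by
  obtain ⟨ans, vd, vd2⟩ := sA
  obtain ⟨hGV, hGW⟩ := hA
  obtain ⟨hV1, hV2, hV3⟩ := hGV
  obtain ⟨hW1n, hW2m, hW3b⟩ := hGW
  dsimp only at hV1 hV2 hV3 hW1n hW2m hW3b
  simp only [stepA]
  have hfq : vd.getD x 0 = cI q x := hV3 x
  rw [hfq]
  set W1 := (if cI q x > 0 then
      (if (List.length (PySem.Set.discard (vd2.getD (cI q x) PySem.Set.empty) x) == 0) = true then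
        vd2.erase (cI q x)
      else vd2.insert (cI q x) (PySem.Set.discard (vd2.getD (cI q x) PySem.Set.empty) x))
    else vd2) with hW1def
  set W2 := W1.insert (cI q x + 1) (PySem.Set.add (W1.getD (cI q x + 1) PySem.Set.empty) x) with hW2def
  set V2 := vd.insert x (cI q x + 1) with hV2def
  have hmid : MidW q x W1 := by
    by_cases hx : x ∈ q
    · have hpos : cI q x > 0 := by
        unfold cI
        exact_mod_cast List.count_pos_iff.mpr hx
      rw [hW1def, if_pos hpos]
      exact pv_mid_of_mem q x vd2 hx ⟨hW1n, hW2m, hW3b⟩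
    · have h0 : ¬ (cI q x > 0) := by
        unfold cI
        simp [List.count_eq_zero_of_not_mem hx]
      rw [hW1def, if_neg h0]
      exact pv_mid_of_not_mem q x vd2 hx ⟨hW1n, hW2m, hW3b⟩
  have hW2good : GoodW (q ++ [x]) W2 := by
    rw [hW2def]
    exact pv_stage2 q x W1 hmid
  have hV2good : GoodV (q ++ [x]) V2 := by
    rw [hV2def]
    exact pv_goodV_step q x vd ⟨hV1, hV2, hV3⟩
  rw [pv_condA (q ++ [x]) V2 W2 hV2good hW2good (q.length : Int) ans]
  have hiff := pv_cond_keys (q ++ [x]) W2.keys hW2good.1 hW2good.2.1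
  refine ⟨⟨hV2good, hW2good⟩, ?_⟩
  by_cases hc : condAbs (q ++ [x]) = true
  · rw [if_pos (hiff.mpr hc), if_pos hc]
  · rw [if_neg (fun hh => hc (hiff.mp hh)), if_neg hc]

-- bestPref only inspects the first L elements
theorem pv_bestPref_prefix (q : List Int) (x : Int) :
    ∀ L : Nat, L ≤ q.length → bestPref (q ++ [x]) L = bestPref q L := by
  intro L
  induction L with
  | zero => intro _; rfl
  | succ L ih =>
    intro hL
    have htake : (q ++ [x]).take (L + 1) = q.take (L + 1) := by
      rw [List.take_append]
      simp [Nat.sub_eq_zero_of_le hL]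
    simp only [bestPref, htake]
    rw [ih (by omega)]

-- A's fold: the final answer + 1 is the largest valid prefix length
theorem pv_mainA (p : List Int) :
    InvA p ((PySem.List.enumerate p).foldl stepA (1, PySem.Dict.empty, PySem.Dict.empty)) ∧
    (p ≠ [] → ((PySem.List.enumerate p).foldl stepA (1, PySem.Dict.empty, PySem.Dict.empty)).1 + 1
        = bestPref p p.length) := by
  induction p using List.reverseRecOn with
  | nil =>
    refine ⟨⟨⟨List.nodup_nil, fun y => by simp [PySem.Dict.keys, PySem.Dict.empty],
        fun y => by simp [PySem.Dict.getD, PySem.Dict.get?, PySem.Dict.empty, cI]⟩,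
        ⟨List.nodup_nil, fun f => by simp [PySem.Dict.keys, PySem.Dict.empty],
        fun f s hs => by simp [PySem.Dict.get?, PySem.Dict.empty] at hs⟩⟩,
      fun h => absurd rfl h⟩
  | append_singleton q x ih =>
    obtain ⟨hA, hbest⟩ := ih
    have hstep := pv_stepA q x _ hA
    have heq : PySem.List.enumerate (q ++ [x]) = PySem.List.enumerate q ++ [((q.length : Int), x)] := by
      rw [PySem.List.enumerate_append]
      norm_num
    rw [heq, List.foldl_append]
    simp only [List.foldl_cons, List.foldl_nil]
    refine ⟨hstep.1, fun _ => ?_⟩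
    rw [hstep.2]
    have hlen : (q ++ [x]).length = q.length + 1 := by simp
    have htake : (q ++ [x]).take (q.length + 1) = q ++ [x] := by
      rw [← hlen, List.take_length]
    rw [hlen]
    simp only [bestPref, htake]
    by_cases hc : condAbs (q ++ [x]) = true
    · rw [if_pos hc, if_pos hc]
    · rw [if_neg hc, if_neg hc, pv_bestPref_prefix q x q.length (le_refl _)]
      by_cases hq : q = []
      · exfalso
        subst hq
        exact hc (pv_cond_singleton x)
      · exact hbest hq

-- ---- B's validity test equals condAbs ----
theorem pv_canDrop (p : List Int) (fc : PySem.Dict Int Int) (h : InvFC p fc) :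
    canDropOne fc = condAbs p := by
  obtain ⟨hnd, hmem, hget⟩ := h
  have hperm : (PySem.List.sorted fc.keys (fun x => x) false).Perm fc.keys :=
    PySem.List.sorted_perm _ _ _
  have hfsnd : (PySem.List.sorted fc.keys (fun x => x) false).Nodup := hperm.nodup_iff.mpr hnd
  have hfsm : ∀ f, f ∈ PySem.List.sorted fc.keys (fun x => x) false ↔ ∃ y ∈ p, cI p y = f := by
    intro f
    rw [hperm.mem_iff, hmem, pv_Fc_pos_iff]
  have hKm : ∀ f, f ∈ Ks p ↔ f ∈ PySem.List.sorted fc.keys (fun x => x) false := by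
    intro f
    rw [pv_mem_Ks, hfsm]
  have hKlen : (Ks p).length = (PySem.List.sorted fc.keys (fun x => x) false).length :=
    pv_length_eq_of_mem_iff (pv_nodup_Ks p) hfsnd hKm
  have hpw : (PySem.List.sorted fc.keys (fun x => x) false).Pairwise (fun a b => a ≤ b) :=
    PySem.List.sorted_pairwise _ _
  unfold canDropOne
  cases hfs : PySem.List.sorted fc.keys (fun x => x) false with
  | nil =>
    rw [hfs] at hKlen
    unfold condAbs
    rw [hKlen]
    simp
  | cons f1 t1 =>
    cases t1 with
    | nil =>
      -- one distinct frequency f1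
      rw [hfs] at hKlen hKm hfsm
      have hall : ∀ y ∈ Dst p, cI p y = f1 := by
        intro y hy
        have hyp : y ∈ p := (pv_mem_Dst p y).mp hy
        have : cI p y ∈ ([f1] : List Int) := (hfsm _).mpr ⟨y, hyp, rfl⟩
        simpa using this
      have hFd : Fc p f1 = ((Dst p).length : Int) := by
        unfold Fc
        congr 1
        exact List.countP_eq_length.mpr (fun y hy => by simp [hall y hy])
      have h1K : ((1:Int) ∈ Ks p) ↔ f1 = 1 := by
        rw [hKm]
        simp [eq_comm]
      unfold condAbs
      dsimp only
      rw [hKlen, hget f1, hFd]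
      rcases Decidable.em (f1 = 1) with he | he
      · simp [he, h1K]
      · have h1K' : ((Ks p).contains 1) = false := by
          simp [List.contains_iff_mem, h1K, he]
        simp only [List.length_cons, List.length_nil, h1K']
        simp [he]
    | cons f2 t2 =>
      cases t2 with
      | nil =>
        -- two distinct frequencies f1 < f2
        rw [hfs] at hKlen hKm hfsm hfsnd hpw
        have hne : f1 ≠ f2 := by
          intro e
          subst e
          simp at hfsnd
        have hle : f1 ≤ f2 := by
          have := List.pairwise_cons.mp hpw
          exact this.1 f2 (by simp)
        have hlt : f1 < f2 := lt_of_le_of_ne hle hne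
        have h1a : 1 ≤ f1 := pv_freq_pos p f1 ((hfsm f1).mp (by simp))
        have h1b : 1 ≤ f2 := pv_freq_pos p f2 ((hfsm f2).mp (by simp))
        unfold condAbs
        dsimp only
        rw [hKlen]
        have hKm' : ∀ f, f ∈ Ks p ↔ (f = f1 ∨ f = f2) := by
          intro f
          rw [hKm]
          simp
        have hany : ((Ks p).any (fun v => Fc p v == 1 && (v == 1 || (Ks p).contains (v - 1))) = true)
            ↔ (∃ v, (v = f1 ∨ v = f2) ∧ Fc p v = 1 ∧ (v = 1 ∨ (v - 1 = f1 ∨ v - 1 = f2))) := by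
          rw [List.any_eq_true]
          constructor
          · rintro ⟨v, hv, hb⟩
            simp only [Bool.and_eq_true, Bool.or_eq_true, beq_iff_eq, List.contains_iff_mem] at hb
            exact ⟨v, (hKm' v).mp hv, hb.1, by
              rcases hb.2 with h | h
              · exact Or.inl h
              · exact Or.inr ((hKm' _).mp h)⟩
          · rintro ⟨v, hv, h2, h3⟩
            refine ⟨v, (hKm' v).mpr hv, ?_⟩
            simp only [Bool.and_eq_true, Bool.or_eq_true, beq_iff_eq, List.contains_iff_mem]
            exact ⟨h2, by
              rcases h3 with h | h
              · exact Or.inl h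
              · exact Or.inr ((hKm' _).mpr h)⟩
        rw [Bool.eq_iff_iff]
        simp only [Bool.or_eq_true, Bool.and_eq_true, beq_iff_eq, List.length_cons,
          List.length_nil, hget]
        constructor
        · rintro (⟨h1, h2⟩ | ⟨h1, h2⟩)
          · exact Or.inr ⟨by simp, hany.mpr ⟨f1, Or.inl rfl, h2, Or.inl h1⟩⟩
          · exact Or.inr ⟨by simp, hany.mpr ⟨f2, Or.inr rfl, h2, Or.inr (Or.inl (by omega))⟩⟩
        · rintro (⟨h1, _⟩ | ⟨_, h2⟩)
          · omega
          · obtain ⟨v, hv, h2, h3⟩ := hany.mp h2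
            rcases hv with rfl | rfl
            · left
              refine ⟨?_, h2⟩
              rcases h3 with h | h | h <;> omega
            · right
              refine ⟨?_, h2⟩
              rcases h3 with h | h | h <;> omega
      | cons f3 t3 =>
        -- three or more distinct frequencies: both tests are false
        rw [hfs] at hKlen
        unfold condAbs
        rw [hKlen]
        simp

-- ---- B's removal step preserves the invariants ----
theorem pv_stepB_inv (q : List Int) (x : Int) (cnt fc : PySem.Dict Int Int)
    (hcnt : ∀ y, cnt.getD y 0 = cI (q ++ [x]) y) (hfc : InvFC (q ++ [x]) fc) :
    (∀ y, (if cnt.getD x 0 > 1 then cnt.insert x (cnt.getD x 0 - 1) else cnt.erase x).getD y 0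
        = cI q y) ∧
    InvFC q
      (if cnt.getD x 0 > 1 then
        (if (fc.insert (cnt.getD x 0) (fc.getD (cnt.getD x 0) 0 - 1)).getD (cnt.getD x 0) 0 == 0 then
          (fc.insert (cnt.getD x 0) (fc.getD (cnt.getD x 0) 0 - 1)).erase (cnt.getD x 0)
        else fc.insert (cnt.getD x 0) (fc.getD (cnt.getD x 0) 0 - 1)).insert (cnt.getD x 0 - 1)
          ((if (fc.insert (cnt.getD x 0) (fc.getD (cnt.getD x 0) 0 - 1)).getD (cnt.getD x 0) 0 == 0 then
            (fc.insert (cnt.getD x 0) (fc.getD (cnt.getD x 0) 0 - 1)).erase (cnt.getD x 0)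
          else fc.insert (cnt.getD x 0) (fc.getD (cnt.getD x 0) 0 - 1)).getD (cnt.getD x 0 - 1) 0 + 1)
      else
        (if (fc.insert (cnt.getD x 0) (fc.getD (cnt.getD x 0) 0 - 1)).getD (cnt.getD x 0) 0 == 0 then
          (fc.insert (cnt.getD x 0) (fc.getD (cnt.getD x 0) 0 - 1)).erase (cnt.getD x 0)
        else fc.insert (cnt.getD x 0) (fc.getD (cnt.getD x 0) 0 - 1))) := by
  obtain ⟨hnd, hmem, hget⟩ := hfc
  have hf : cnt.getD x 0 = cI q x + 1 := by
    rw [hcnt x, pv_cI_append, if_pos rfl]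
  have hcnn : 0 ≤ cI q x := by unfold cI; positivity
  have hFposf : 0 < Fc (q ++ [x]) (cI q x + 1) := by
    rw [pv_Fc_pos_iff]
    exact ⟨x, by simp, by rw [pv_cI_append, if_pos rfl]⟩
  rw [hf]
  have hfc1getD : ∀ g, (fc.insert (cI q x + 1) (fc.getD (cI q x + 1) 0 - 1)).getD g 0
      = if g = cI q x + 1 then Fc (q ++ [x]) (cI q x + 1) - 1 else Fc (q ++ [x]) g := by
    intro g
    rw [PySem.Dict.getD_insert]
    split_ifs with h
    · rw [hget]
    · rw [hget]
  have hfc1mem : ∀ g, g ∈ (fc.insert (cI q x + 1) (fc.getD (cI q x + 1) 0 - 1)).keys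
      ↔ (g = cI q x + 1 ∨ 0 < Fc (q ++ [x]) g) := by
    intro g
    rw [PySem.Dict.mem_keys_insert, hmem]
  have hfc1nd : (fc.insert (cI q x + 1) (fc.getD (cI q x + 1) 0 - 1)).keys.Nodup :=
    PySem.Dict.nodup_keys_insert _ _ _ hnd
  by_cases hx : x ∈ q
  · -- f = cI q x + 1 > 1
    have hpos : 0 < cI q x := by
      unfold cI
      exact_mod_cast List.count_pos_iff.mpr hx
    have hFrel : ∀ g, Fc (q ++ [x]) g
        = Fc q g + (if g = cI q x + 1 then 1 else 0) - (if g = cI q x then 1 else 0) :=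
      pv_Fc_append_mem q x hx
    have hGc : Fc q (cI q x) = Fc (q ++ [x]) (cI q x) + 1 := by
      have := hFrel (cI q x)
      rw [if_neg (by omega), if_pos rfl] at this
      omega
    have hGc1 : Fc q (cI q x + 1) = Fc (q ++ [x]) (cI q x + 1) - 1 := by
      have := hFrel (cI q x + 1)
      rw [if_pos rfl, if_neg (by omega)] at this
      omega
    have hGo : ∀ g, g ≠ cI q x → g ≠ cI q x + 1 → Fc q g = Fc (q ++ [x]) g := by
      intro g h1 h2
      have := hFrel g
      rw [if_neg h2, if_neg h1] at this
      omega
    rw [if_pos (by omega), if_pos (by omega)]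
    simp only [show cI q x + 1 - 1 = cI q x from by ring]
    constructor
    · intro y
      rw [PySem.Dict.getD_insert]
      by_cases hyx : y = x
      · rw [if_pos hyx, hyx]
      · rw [if_neg hyx, hcnt y, pv_cI_append, if_neg hyx, add_zero]
    · by_cases hz : Fc (q ++ [x]) (cI q x + 1) - 1 = 0
      · rw [if_pos (by rw [hfc1getD, if_pos rfl]; simp [hz])]
        refine ⟨?_, fun g => ?_, fun g => ?_⟩
        · apply PySem.Dict.nodup_keys_insert
          rw [pv_keys_erase]
          exact hfc1nd.filter _
        · rw [PySem.Dict.mem_keys_insert, pv_keys_erase, List.mem_filter]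
          simp only [Bool.not_eq_eq_eq_not, Bool.not_true, beq_eq_false_iff_ne, ne_eq, hfc1mem]
          by_cases hg1 : g = cI q x
          · rw [hg1]
            have : 0 < Fc q (cI q x) := by
              have := pv_Fc_nonneg (q ++ [x]) (cI q x)
              omega
            constructor
            · intro _; exact this
            · intro _; exact Or.inl rfl
          · by_cases hg2 : g = cI q x + 1
            · rw [hg2]
              constructor
              · rintro (h | ⟨_, h⟩)
                · omega
                · exact absurd rfl h
              · intro h
                exfalso
                rw [hGc1] at h
                omega
            · rw [hGo g hg1 hg2]
              constructor
              · rintro (h | ⟨h | h, _⟩)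
                · exact absurd h hg1
                · exact absurd h hg2
                · exact h
              · intro h
                exact Or.inr ⟨Or.inr h, hg2⟩
        · rw [PySem.Dict.getD_insert]
          by_cases hg1 : g = cI q x
          · rw [if_pos hg1, pv_getD_erase, if_neg (by omega), hfc1getD, if_neg (by omega), hg1]
            omega
          · rw [if_neg hg1, pv_getD_erase]
            by_cases hg2 : g = cI q x + 1
            · rw [if_pos hg2, hg2, hGc1]
              omega
            · rw [if_neg hg2, hfc1getD, if_neg hg2, hGo g hg1 hg2]
      · rw [if_neg (by rw [hfc1getD, if_pos rfl]; simp [hz])]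
        refine ⟨PySem.Dict.nodup_keys_insert _ _ _ hfc1nd, fun g => ?_, fun g => ?_⟩
        · rw [PySem.Dict.mem_keys_insert, hfc1mem]
          by_cases hg1 : g = cI q x
          · rw [hg1]
            have : 0 < Fc q (cI q x) := by
              have := pv_Fc_nonneg (q ++ [x]) (cI q x)
              omega
            constructor
            · intro _; exact this
            · intro _; exact Or.inl rfl
          · by_cases hg2 : g = cI q x + 1
            · rw [hg2]
              have h1 : 0 < Fc q (cI q x + 1) := by
                have := pv_Fc_nonneg (q ++ [x]) (cI q x + 1)
                omega
              constructor
              · intro _; exact h1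
              · intro _; exact Or.inr (Or.inl rfl)
            · rw [hGo g hg1 hg2]
              constructor
              · rintro (h | h | h)
                · exact absurd h hg1
                · exact absurd h hg2
                · exact h
              · intro h
                exact Or.inr (Or.inr h)
        · rw [PySem.Dict.getD_insert]
          by_cases hg1 : g = cI q x
          · rw [if_pos hg1, hfc1getD, if_neg (by omega), hg1]
            omega
          · rw [if_neg hg1, hfc1getD]
            by_cases hg2 : g = cI q x + 1
            · rw [if_pos hg2, hg2, hGc1]
            · rw [if_neg hg2, hGo g hg1 hg2]
  · -- f = 1 (x does not occur in q)
    have hc0 : cI q x = 0 := by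
      unfold cI
      simp [List.count_eq_zero_of_not_mem hx]
    have hFrel : ∀ g, Fc (q ++ [x]) g = Fc q g + (if g = 1 then 1 else 0) :=
      pv_Fc_append_not_mem q x hx
    have hG1 : Fc q 1 = Fc (q ++ [x]) 1 - 1 := by
      have := hFrel 1
      rw [if_pos rfl] at this
      omega
    have hGo : ∀ g, g ≠ 1 → Fc q g = Fc (q ++ [x]) g := by
      intro g h1
      have := hFrel g
      rw [if_neg h1] at this
      omega
    rw [hc0]
    norm_num
    constructor
    · intro y
      rw [pv_getD_erase]
      by_cases hyx : y = x
      · rw [if_pos hyx, hyx]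
        unfold cI
        simp [List.count_eq_zero_of_not_mem hx]
      · rw [if_neg hyx, hcnt y, pv_cI_append, if_neg hyx, add_zero]
    · rw [hc0] at hfc1getD hfc1mem hFposf hfc1nd
      norm_num at hfc1getD hfc1mem hFposf hfc1nd
      by_cases hz : Fc (q ++ [x]) 1 - 1 = 0
      · rw [if_pos (by rw [hget]; exact hz)]
        refine ⟨?_, fun g => ?_, fun g => ?_⟩
        · rw [pv_keys_erase]
          exact hfc1nd.filter _
        · rw [pv_keys_erase, List.mem_filter]
          simp only [Bool.not_eq_eq_eq_not, Bool.not_true, beq_eq_false_iff_ne, ne_eq, hfc1mem]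
          by_cases hg1 : g = 1
          · rw [hg1]
            constructor
            · rintro ⟨_, h⟩
              exact absurd rfl h
            · intro h
              exfalso
              rw [hG1] at h
              omega
          · rw [hGo g hg1]
            constructor
            · rintro ⟨h | h, _⟩
              · exact absurd h hg1
              · exact h
            · intro h
              exact ⟨Or.inr h, hg1⟩
        · rw [pv_getD_erase]
          by_cases hg1 : g = 1
          · rw [if_pos hg1, hg1, hG1]
            omega
          · rw [if_neg hg1, hfc1getD, if_neg hg1, hGo g hg1]
      · rw [if_neg (by rw [hget]; exact hz)]
        refine ⟨hfc1nd, fun g => ?_, fun g => ?_⟩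
        · rw [hfc1mem]
          by_cases hg1 : g = 1
          · rw [hg1]
            have h1 : 0 < Fc q 1 := by
              have := pv_Fc_nonneg (q ++ [x]) 1
              omega
            constructor
            · intro _; exact h1
            · intro _; exact Or.inl rfl
          · rw [hGo g hg1]
            constructor
            · rintro (h | h)
              · exact absurd h hg1
              · exact h
            · exact Or.inr
        · rw [hfc1getD]
          by_cases hg1 : g = 1
          · rw [if_pos hg1, hg1, hG1]
          · rw [if_neg hg1, hGo g hg1]

-- ---- B's backward loop computes bestPref ----
theorem pv_loopB (L : Nat) : ∀ (nums : List Int) (cnt fc : PySem.Dict Int Int),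
    L ≤ nums.length →
    (∀ y, cnt.getD y 0 = cI (nums.take L) y) → InvFC (nums.take L) fc →
    loopB nums cnt fc L = bestPref nums L := by
  induction L with
  | zero => intro nums cnt fc _ _ _; rfl
  | succ L ih =>
    intro nums cnt fc hL hcnt hfc
    have hLlt : L < nums.length := by omega
    have htake : nums.take (L + 1) = nums.take L ++ [nums[L]] := by
      rw [List.take_succ, List.getElem?_eq_getElem hLlt]
      rfl
    have hxval : (PySem.List.pyGet? nums (L : Int)).getD 0 = nums[L] := by
      rw [PySem.List.pyGet?_natCast, List.getElem?_eq_getElem hLlt]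
      rfl
    rw [htake] at hcnt hfc
    simp only [loopB, bestPref, pv_canDrop _ _ (htake ▸ hfc), htake]
    by_cases hc : condAbs (nums.take L ++ [nums[L]]) = true
    · rw [if_pos hc, if_pos hc]
    · rw [if_neg hc, if_neg hc, hxval]
      obtain ⟨hcnt', hfc'⟩ := pv_stepB_inv (nums.take L) nums[L] cnt fc hcnt hfc
      exact ih nums _ _ (by omega) hcnt' hfc'

-- ---- initial dictionaries of B ----
theorem pv_cnt_init (nums : List Int) :
    ∀ y, (nums.foldl (fun d x => d.insert x (d.getD x 0 + 1)) PySem.Dict.empty).getD y 0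
      = cI nums y := by
  intro y
  rw [PySem.Dict.foldl_insert_getD_add_one_eq_counter, PySem.Dict.getD_counter]
  rfl

theorem pv_fc_init (nums : List Int) :
    InvFC nums
      ((nums.foldl (fun d x => d.insert x (d.getD x 0 + 1)) PySem.Dict.empty).values.foldl
        (fun d f => d.insert f (d.getD f 0 + 1)) PySem.Dict.empty) := by
  rw [PySem.Dict.foldl_insert_getD_add_one_eq_counter,
    PySem.Dict.foldl_insert_getD_add_one_eq_counter]
  have hvals : (PySem.Dict.counter nums).values = (Dst nums).map (cI nums) := by
    rw [PySem.Dict.values_eq_map_keys _ (PySem.Dict.nodup_keys_counter nums) 0,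
      PySem.Dict.keys_counter]
    refine List.map_congr_left (fun k _ => ?_)
    rw [PySem.Dict.getD_counter]
    rfl
  refine ⟨PySem.Dict.nodup_keys_counter _, fun f => ?_, fun f => ?_⟩
  · rw [PySem.Dict.keys_counter, PySem.Set.mem_ofList, hvals, List.mem_map, pv_Fc_pos_iff]
    constructor
    · rintro ⟨y, hy, rfl⟩
      exact ⟨y, (pv_mem_Dst nums y).mp hy, rfl⟩
    · rintro ⟨y, hy, rfl⟩
      exact ⟨y, (pv_mem_Dst nums y).mpr hy, rfl⟩
  · rw [PySem.Dict.getD_counter, hvals]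
    unfold Fc
    congr 1
    rw [List.count_eq_countP, List.countP_map]
    refine List.countP_congr (fun y _ => ?_)
    rfl

-- B computes bestPref on the whole list
theorem pv_altB (nums : List Int) : maxEqualFreq_alt nums = bestPref nums nums.length := by
  unfold maxEqualFreq_alt
  refine pv_loopB nums.length nums _ _ (le_refl _) ?_ ?_
  · rw [List.take_length]
    exact pv_cnt_init nums
  · rw [List.take_length]
    exact pv_fc_init nums

-- ===== VERDICT (by name: the statement is the Claim_ definition above) =====
theorem maxEqualFreq_spec : Claim_unchanged_maxEqualFreq := by
  intro nums _
  intro hnd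
  have hne : nums ≠ [] := hnd
  rw [pv_altB]
  unfold maxEqualFreq
  by_cases hone : nums.length = 1
  · rw [if_pos (by simp [PySem.List.len_eq, hone])]
    obtain ⟨y, rfl⟩ := List.length_eq_one_iff.mp hone
    have hb : bestPref [y] [y].length = 1 := by
      show (if condAbs [y] = true then ((0 : Nat) : Int) + 1 else bestPref [y] 0) = 1
      rw [if_pos (pv_cond_singleton y)]
      norm_num
    rw [hb]
  · rw [if_neg (by simp [PySem.List.len_eq]; omega)]
    exact ((pv_mainA nums).2 hne)

theorem maxEqualFreq_changed : Claim_changed_maxEqualFreq := by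
  unfold Claim_changed_maxEqualFreq; decide

theorem maxEqualFreq_tight : Claim_exact_maxEqualFreq := by
  intro nums _ hD
  unfold D_maxEqualFreq at hD
  subst hD
  decide
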